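-- pv_equiv track=rewrite | github.com/faraza72/Flask | utils.py | check
-- ===== SOURCE A (Python) =====
-- def check(data):
--
-- 	dict = {
-- 	"_id": False,
-- 	"name":False,
-- 	"budget":False,
-- 	"genres":False,
-- 	"description":False,
-- 	"popularity":False,
-- 	"production_companies":False,
-- 	"vote_average":False,
-- 	"vote_count":False,
-- 	"release_date":False,
-- 	"revenue":False,
-- 	"runtime":False,
-- 	"imdb_id":False,
-- 	"adult":False,
-- 	"language":False
-- 	}
-- 	for ele in data:
-- 		if ele in dict:
-- 			del dict[ele]
-- 	return dict
-- ===== SOURCE B (Python) =====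
-- EXPECTED = ("_id", "name", "budget", "genres", "description", "popularity",
--             "production_companies", "vote_average", "vote_count", "release_date",
--             "revenue", "runtime", "imdb_id", "adult", "language")
--
--
-- def check(data):
--     present = set(data)
--     return {f: False for f in EXPECTED if f not in present}
-- ===== Notes on version B (the rewrite author's own statement) =====
-- stated objective: idiomatic
-- what changed: Instead of materialising the full expected-fields dict and deleting each present key while looping over data, B builds a set of data once and keeps the absent expected fields with a single dict comprehension over the fixed expected list.
import Mathlib
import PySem

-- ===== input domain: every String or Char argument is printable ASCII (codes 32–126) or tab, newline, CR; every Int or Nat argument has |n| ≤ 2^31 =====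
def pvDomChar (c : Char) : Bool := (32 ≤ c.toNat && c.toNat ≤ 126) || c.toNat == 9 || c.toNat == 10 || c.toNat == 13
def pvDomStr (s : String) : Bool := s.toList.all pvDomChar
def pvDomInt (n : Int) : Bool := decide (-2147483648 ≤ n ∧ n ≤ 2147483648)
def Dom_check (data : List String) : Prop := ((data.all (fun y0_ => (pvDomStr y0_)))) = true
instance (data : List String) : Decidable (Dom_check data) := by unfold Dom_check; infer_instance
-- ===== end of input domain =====

-- B replaces A's build-full-dict-then-delete loop over data by one filter over the
-- fixed expected-field list against a set of data (idiomatic; same observable result).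


-- ===== PORT A =====
-- the literal dict A starts from
def checkDict0 : PySem.Dict String Bool := PySem.Dict.ofList
  [("_id", false), ("name", false), ("budget", false), ("genres", false),
   ("description", false), ("popularity", false), ("production_companies", false),
   ("vote_average", false), ("vote_count", false), ("release_date", false),
   ("revenue", false), ("runtime", false), ("imdb_id", false), ("adult", false),
   ("language", false)]

-- for ele in data: if ele in dict: del dict[ele]
def check (data : List String) : List (String × Bool) :=
  (data.foldl (fun d ele => if d.contains ele then d.erase ele else d) checkDict0).items

-- ===== PORT B =====
def checkExpected : List String :=
  ["_id", "name", "budget", "genres", "description", "popularity",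
   "production_companies", "vote_average", "vote_count", "release_date",
   "revenue", "runtime", "imdb_id", "adult", "language"]

-- present = set(data); {f: False for f in EXPECTED if f not in present}
def check_alt (data : List String) : List (String × Bool) :=
  let present := PySem.Set.ofList data
  (checkExpected.filter (fun f => !(PySem.Set.contains present f))).map (fun f => (f, false))

-- ===== PRECONDITION & SPEC =====
def Spec_check (data : List String) (out : List (String × Bool)) : Prop := out = check_alt data
instance (data : List String) (out : List (String × Bool)) : Decidable (Spec_check data out) := by unfold Spec_check; infer_instance

-- ===== CLAIM (what is proved, stated in full; the proofs are below) =====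
def Claim_equal_check : Prop := ∀ (data : List String), Dom_check data → Spec_check data (check data)

-- ===== LEMMAS AND PROOFS =====

-- one step of A's loop always filters the entry for `ele` out of the items list
theorem check_step_items {d : PySem.Dict String Bool} {e : String} :
    (if d.contains e then d.erase e else d).items = d.items.filter (fun p => !(p.1 == e)) := by
  by_cases h : d.contains e = true
  · simp [h, PySem.Dict.erase]
  · simp only [h, if_neg, Bool.false_eq_true, not_false_iff]
    have : ∀ p ∈ d.items, (!(p.1 == e)) = true := by
      intro p hp
      simp only [Bool.not_eq_eq_eq_not, Bool.not_true]
      by_contra hb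
      exact h (List.any_eq_true.mpr ⟨p, hp, by simpa using hb⟩)
    simp [List.filter_eq_self.mpr this]

-- A's whole loop filters out every key occurring in data
theorem check_foldl_items (data : List String) (d : PySem.Dict String Bool) :
    (data.foldl (fun d ele => if d.contains ele then d.erase ele else d) d).items
      = d.items.filter (fun p => !(data.contains p.1)) := by
  induction data generalizing d with
  | nil => simp
  | cons e rest ih =>
      simp only [List.foldl_cons]
      rw [ih, check_step_items, List.filter_filter]
      apply List.filter_congr
      intro p _
      simp [Bool.not_or, Bool.and_comm, beq_eq_decide]

theorem check_filter_map (data : List String) :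
    checkDict0.items.filter (fun p => !(data.contains p.1))
      = (checkExpected.filter (fun f => !(data.contains f))).map (fun f => (f, false)) := by
  have h : checkDict0.items = checkExpected.map (fun f => (f, false)) := by decide
  rw [h, List.filter_map]
  rfl

-- ===== VERDICT (by name: the statement is the Claim_ definition above) =====
theorem check_spec : Claim_equal_check := by
  intro data _
  show check data = check_alt data
  unfold check check_alt
  rw [check_foldl_items, check_filter_map]
  simp [PySem.Set.contains]
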